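-- pv_equiv track=rewrite | github.com/vterreno/ejercicios-curso-python | Ejercicios/Ejercicio #16 - Volumen 4 - 400 - Durmiendo en albergues/AbrilCarballo.py | leer_medio
-- ===== SOURCE A (Python) =====
-- def leer_medio(camas): # x....x
--     distancia_actual = 0
--     hay_x = False
--     max_distancia_medio = 0
--
--     for i in range(len(camas)):
--         if camas[i] == "x":
--             if hay_x:  # Si ya encontramos una 'x' antes, verificamos la distancia
--                 if distancia_actual % 2 == 0:  # Par
--                     distancia_calculada = (distancia_actual // 2) - 1
--                 else:  # Impar
--                     distancia_calculada = distancia_actual // 2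
--
--                 # Asignamos el valor mayor entre lo que ya tenemos y la nueva distancia
--                 if distancia_calculada > max_distancia_medio:
--                     max_distancia_medio = distancia_calculada
--             hay_x = True  # Marcamos que hemos encontrado la primera 'x'
--             distancia_actual = 0  # Reiniciamos el contador de distancia
--
--         elif hay_x:  # Contamos las camas vacías entre 'x'
--             distancia_actual += 1
--
--     return max_distancia_medio
-- ===== SOURCE B (Python) =====
-- def leer_medio(camas):
--     pos = [i for i, c in enumerate(camas) if c == "x"]
--     return max([0] + [(b - a - 2) // 2 for a, b in zip(pos, pos[1:])])
-- ===== Notes on version B (the rewrite author's own statement) =====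
-- stated objective: simpler
-- what changed: Replaces A's stateful scan with a found-flag, blank counter and parity-split max update by first collecting the indices of occupied beds and then taking the max of the closed-form half-gap (b - a - 2) // 2 over consecutive index pairs.
import Mathlib
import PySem

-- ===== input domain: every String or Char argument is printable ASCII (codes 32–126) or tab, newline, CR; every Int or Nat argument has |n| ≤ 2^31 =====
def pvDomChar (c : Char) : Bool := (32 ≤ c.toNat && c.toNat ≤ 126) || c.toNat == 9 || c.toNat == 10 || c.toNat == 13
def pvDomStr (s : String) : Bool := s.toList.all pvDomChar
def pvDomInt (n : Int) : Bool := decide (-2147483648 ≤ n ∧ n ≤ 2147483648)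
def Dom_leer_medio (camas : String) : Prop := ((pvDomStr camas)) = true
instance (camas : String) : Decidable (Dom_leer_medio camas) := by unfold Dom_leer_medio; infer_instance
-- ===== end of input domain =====

-- B replaces A's stateful flag/counter scan by collecting the 'x' positions and taking a
-- closed-form half-gap over consecutive pairs (objective: simpler decomposition, same cost).

-- ===== PORT A =====
-- the for-loop of A, state = (distancia_actual, hay_x, max_distancia_medio)
def leerLoopA : List Char → Int → Bool → Int → Int
  | [], _, _, m => m
  | c :: rest, d, h, m =>
    if c = 'x' then
      let m' :=
        if h then
          let calc_ := if PySem.Int.mod d 2 = 0 then PySem.Int.floordiv d 2 - 1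
                      else PySem.Int.floordiv d 2
          if calc_ > m then calc_ else m
        else m
      leerLoopA rest 0 true m'
    else if h then
      leerLoopA rest (d + 1) true m
    else
      leerLoopA rest d h m

def leer_medio (camas : String) : Int := leerLoopA camas.toList 0 false 0

-- ===== PORT B =====
-- pos = [i for i, c in enumerate(camas) if c == "x"]
-- return max([0] + [(b - a - 2) // 2 for a, b in zip(pos, pos[1:])])
def leer_medio_alt (camas : String) : Int :=
  let pos := (PySem.List.enumerate camas.toList 0).filterMap
    (fun p => if p.2 = 'x' then some p.1 else none)
  let pairs := pos.zip (pos.drop 1)  -- zip(pos, pos[1:])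
  (pairs.map (fun p => PySem.Int.floordiv (p.2 - p.1 - 2) 2)).foldl max 0

-- ===== PRECONDITION & SPEC =====
def Spec_leer_medio (camas : String) (out : Int) : Prop := out = leer_medio_alt camas
instance (camas : String) (out : Int) : Decidable (Spec_leer_medio camas out) := by unfold Spec_leer_medio; infer_instance

-- ===== CLAIM (what is proved, stated in full; the proofs are below) =====
def Claim_equal_leer_medio : Prop := ∀ (camas : String), Dom_leer_medio camas → Spec_leer_medio camas (leer_medio camas)

-- ===== LEMMAS AND PROOFS =====

-- positions of 'x' in a list of chars (0-based)
def posOf : List Char → List Int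
  | [] => []
  | c :: rest => if c = 'x' then 0 :: (posOf rest).map (· + 1) else (posOf rest).map (· + 1)

-- the half-gap values of consecutive positions
def vals (q : List Int) : List Int :=
  (q.zip (q.drop 1)).map (fun p => PySem.Int.floordiv (p.2 - p.1 - 2) 2)

theorem vals_map_add (s : Int) (q : List Int) : vals (q.map (· + s)) = vals q := by
  unfold vals
  rw [(List.map_drop ..).symm, List.zip_map]
  simp only [List.map_map]
  apply List.map_congr_left
  intro p _
  simp [Prod.map]

theorem calc_eq (d : Int) :
    (if PySem.Int.mod d 2 = 0 then PySem.Int.floordiv d 2 - 1 else PySem.Int.floordiv d 2)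
      = PySem.Int.floordiv (0 - -(d + 1) - 2) 2 := by
  have h2 : (0:Int) < 2 := by norm_num
  rw [PySem.Int.mod_eq_emod_of_pos h2, PySem.Int.floordiv_eq_ediv_of_pos h2,
      PySem.Int.floordiv_eq_ediv_of_pos h2]
  have : (0 - -(d + 1) - 2) = d - 1 := by ring
  rw [this]
  split_ifs with h <;> omega

theorem max_eq_ite (m v : Int) : (if v > m then v else m) = max m v := by
  split_ifs with h <;> omega

theorem loopA_true (l : List Char) : ∀ (d m : Int),
    leerLoopA l d true m = (vals (-(d + 1) :: posOf l)).foldl max m := by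
  induction l with
  | nil => intro d m; simp [leerLoopA, vals, posOf]
  | cons c rest ih =>
    intro d m
    by_cases hc : c = 'x'
    · simp only [leerLoopA, hc, if_pos, if_true, posOf]
      rw [ih]
      have hshift : vals ((0 : Int) :: (posOf rest).map (· + 1))
          = vals (-(0 + 1) :: posOf rest) := by
        simpa using vals_map_add 1 ((-(0 + 1)) :: posOf rest)
      have hq : vals (-(d + 1) :: (0 : Int) :: (posOf rest).map (· + 1))
          = PySem.Int.floordiv (0 - -(d + 1) - 2) 2 :: vals ((0 : Int) :: (posOf rest).map (· + 1)) := by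
        unfold vals
        simp
      rw [hq, hshift, List.foldl_cons, calc_eq, max_eq_ite]
    · simp only [leerLoopA, hc, if_neg, if_false, if_true, posOf]
      rw [ih]
      have : vals (-(d + 1) :: (posOf rest).map (· + 1))
          = vals (-(d + 1 + 1) :: posOf rest) := by
        simpa using vals_map_add 1 ((-(d + 1 + 1)) :: posOf rest)
      rw [this]

theorem loopA_false (l : List Char) : ∀ (d m : Int),
    leerLoopA l d false m = (vals (posOf l)).foldl max m := by
  induction l with
  | nil => intro d m; simp [leerLoopA, vals, posOf]
  | cons c rest ih =>
    intro d m
    by_cases hc : c = 'x'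
    · simp only [leerLoopA, hc, if_pos, if_false, posOf, if_true]
      rw [loopA_true]
      have : vals ((0 : Int) :: (posOf rest).map (· + 1))
          = vals (-(0 + 1) :: posOf rest) := by
        simpa using vals_map_add 1 ((-(0 + 1)) :: posOf rest)
      rw [this]
      simp
    · simp only [leerLoopA, hc, if_neg, if_false, Bool.false_eq_true, posOf]
      rw [ih, vals_map_add]

theorem filterMap_enumerate_eq (l : List Char) : ∀ (s : Int),
    (PySem.List.enumerate l s).filterMap (fun p => if p.2 = 'x' then some p.1 else none)
      = (posOf l).map (· + s) := by
  induction l with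
  | nil => intro s; simp [PySem.List.enumerate_nil, posOf]
  | cons c rest ih =>
    intro s
    rw [PySem.List.enumerate_cons, List.filterMap_cons]
    by_cases hc : c = 'x'
    · simp only [hc, if_pos, posOf, if_true, List.map_cons]
      rw [ih (s + 1)]
      simp only [List.map_map]
      congr 1
      · omega
      · apply List.map_congr_left; intro x _; simp; ring
    · simp only [hc, if_neg, posOf, if_false]
      rw [ih (s + 1)]
      simp only [List.map_map]
      apply List.map_congr_left; intro x _; simp; ring

-- ===== VERDICT (by name: the statement is the Claim_ definition above) =====
theorem leer_medio_spec : Claim_equal_leer_medio := by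
  intro camas _
  unfold Spec_leer_medio leer_medio leer_medio_alt
  rw [loopA_false, filterMap_enumerate_eq]
  simp [vals, List.map_id']
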